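-- pv_equiv track=rewrite | github.com/PearlCoastal/Leetcode_Solutions_python3 | Prefix/prefix_3.py | atMostK
-- ===== SOURCE A (Python) =====
-- def atMostK(nums: [int], k: int) -> int:
--
--     ans = 0
--     pre = 0
--
--     for i in range(1, len(nums)):
--         if nums[i] <= k:
--             pre += 1
--         else:
--             pre = 0
--         ans += pre
--
--     return ans
-- ===== SOURCE B (Python) =====
-- def atMostK(nums: [int], k: int) -> int:
--     total = 0
--     run = 0
--     for x in nums[1:]:
--         if x <= k:
--             run += 1
--         else:
--             total += run * (run + 1) // 2
--             run = 0
--     total += run * (run + 1) // 2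
--     return total
-- ===== Notes on version B (the rewrite author's own statement) =====
-- stated objective: alternative
-- what changed: B scans nums[1:] as maximal runs of elements <= k and adds the closed-form triangular count L*(L+1)//2 per run, instead of A's per-index running 'pre' counter added into the answer at every step.
import Mathlib
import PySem

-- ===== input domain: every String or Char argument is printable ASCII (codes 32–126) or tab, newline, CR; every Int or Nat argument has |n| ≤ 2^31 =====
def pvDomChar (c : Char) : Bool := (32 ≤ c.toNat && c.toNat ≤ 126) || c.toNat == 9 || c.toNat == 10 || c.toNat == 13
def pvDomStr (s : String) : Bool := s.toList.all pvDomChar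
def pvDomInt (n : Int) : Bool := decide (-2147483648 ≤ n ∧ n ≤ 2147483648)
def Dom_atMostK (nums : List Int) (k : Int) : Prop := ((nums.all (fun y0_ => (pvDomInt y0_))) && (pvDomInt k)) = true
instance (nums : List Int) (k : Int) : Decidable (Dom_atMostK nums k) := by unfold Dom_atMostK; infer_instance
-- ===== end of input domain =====

-- B scans nums[1:] as maximal runs of elements ≤ k, adding the triangular count run*(run+1)//2
-- per run, instead of A's per-index running counter. Equivalence is proved for all inputs.

-- ===== PORT A =====
-- for i in range(1, len(nums)): if nums[i] <= k: pre += 1 else: pre = 0; ans += pre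
def atMostK (nums : List Int) (k : Int) : Int :=
  let st := (PySem.List.pyRange 1 (PySem.List.len nums) 1).foldl
    (fun (acc : Int × Int) i =>
      if PySem.List.pyGetD nums i 0 ≤ k then (acc.1 + (acc.2 + 1), acc.2 + 1)
      else (acc.1, 0))
    (0, 0)
  st.1

-- ===== PORT B =====
-- loop over nums[1:] keeping (run, total); flush total += run*(run+1)//2 at each run end and at the end
def atMostKRuns (k : Int) : List Int → Int → Int → Int
  | [], run, total => total + PySem.Int.floordiv (run * (run + 1)) 2
  | x :: xs, run, total =>
      if x ≤ k then atMostKRuns k xs (run + 1) total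
      else atMostKRuns k xs 0 (total + PySem.Int.floordiv (run * (run + 1)) 2)

def atMostK_alt (nums : List Int) (k : Int) : Int :=
  atMostKRuns k (PySem.List.slice nums (some 1) none) 0 0

-- ===== PRECONDITION & SPEC =====
def Spec_atMostK (nums : List Int) (k : Int) (out : Int) : Prop := out = atMostK_alt nums k
instance (nums : List Int) (k : Int) (out : Int) : Decidable (Spec_atMostK nums k out) := by unfold Spec_atMostK; infer_instance

-- ===== CLAIM (what is proved, stated in full; the proofs are below) =====
def Claim_equal_atMostK : Prop := ∀ (nums : List Int) (k : Int), Dom_atMostK nums k → Spec_atMostK nums k (atMostK nums k)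

-- ===== LEMMAS AND PROOFS =====

-- triangular numbers: tri (r+1) = tri r + (r+1)
theorem tri_succ (r : Int) :
    PySem.Int.floordiv ((r + 1) * (r + 1 + 1)) 2 = PySem.Int.floordiv (r * (r + 1)) 2 + (r + 1) := by
  obtain ⟨m, hm⟩ := Int.even_mul_succ_self r
  have h1 : r * (r + 1) = 2 * m := by omega
  have h2 : (r + 1) * (r + 1 + 1) = 2 * (m + (r + 1)) := by nlinarith
  rw [h1, h2, PySem.Int.floordiv_eq_ediv_of_pos (by norm_num),
      PySem.Int.floordiv_eq_ediv_of_pos (by norm_num),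
      Int.mul_ediv_cancel_left _ (by norm_num), Int.mul_ediv_cancel_left _ (by norm_num)]

-- loop invariant: A's fold over the tail, started at (total + tri run, run), computes B's runLoop
theorem key (k : Int) (l : List Int) (run total : Int) :
    (l.foldl
      (fun (acc : Int × Int) x =>
        if x ≤ k then (acc.1 + (acc.2 + 1), acc.2 + 1) else (acc.1, 0))
      (total + PySem.Int.floordiv (run * (run + 1)) 2, run)).1
    = atMostKRuns k l run total := by
  induction l generalizing run total with
  | nil => simp [atMostKRuns]
  | cons x xs ih =>
    simp only [List.foldl, atMostKRuns]
    by_cases hx : x ≤ k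
    · simp only [hx, if_true]
      have := ih (run + 1) total
      rw [← this, tri_succ]
      ring_nf
    · simp only [hx, if_false]
      have := ih 0 (total + PySem.Int.floordiv (run * (run + 1)) 2)
      rw [← this]
      norm_num

-- ===== VERDICT (by name: the statement is the Claim_ definition above) =====
theorem atMostK_spec : Claim_equal_atMostK := by
  intro nums k _
  unfold Spec_atMostK atMostK atMostK_alt
  rw [PySem.List.slice_from_one]
  have hfold := PySem.List.foldl_pyRange_pyGetD nums 0
    (fun (acc : Int × Int) x =>
      if x ≤ k then (acc.1 + (acc.2 + 1), acc.2 + 1) else (acc.1, 0))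
    ((0 : Int), (0 : Int)) (a := 1) (by norm_num)
  simp only [hfold]
  have := key k (nums.drop 1) 0 0
  simpa using this
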